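-- pv_equiv track=rewrite | github.com/algorhythms/LeetCode | 525 Contiguous Array.py | findMaxLength_TLE
-- ===== SOURCE A (Python) =====
-- def findMaxLength_TLE(nums):
--     """
--     scan nums[i:j], check number of 0 (pre-calculated)
--     O(n^2)
--
--     :type nums: List[int]
--     :rtype: int
--     """
--     F = [0]
--     n = len(nums)
--     for e in nums:
--         if e == 0:
--             F.append(F[-1] + 1)
--         else:
--             F.append(F[-1])
--
--     ret = 0
--     for i in range(n):
--         for j in range(i+1, n+1):
--             if (F[j] - F[i]) * 2 == j - i:
--                 ret = max(ret, j - i)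
--
--     return ret
-- ===== SOURCE B (Python) =====
-- def findMaxLength_TLE(nums):
--     """
--     O(n): one pass keeping the first index at which each prefix balance
--     (#zeros - #non-zeros) occurs; a repeated balance at index k means the
--     slice between the two indices has equally many zeros and ones.
--     """
--     first = {0: 0}
--     bal = 0
--     best = 0
--     k = 0
--     for e in nums:
--         k += 1
--         bal += 1 if e == 0 else -1
--         if bal in first:
--             best = max(best, k - first[bal])
--         else:
--             first[bal] = k
--     return best
-- ===== Notes on version B (the rewrite author's own statement) =====
-- stated objective: faster
-- what changed: Replaced the quadratic scan over all pairs (i,j) of prefix-zero-counts by a single pass that tracks the running balance (+1 for 0, -1 for nonzero) and a hash map of the first index each balance occurs at, taking max(k - first[bal]).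
import Mathlib
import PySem

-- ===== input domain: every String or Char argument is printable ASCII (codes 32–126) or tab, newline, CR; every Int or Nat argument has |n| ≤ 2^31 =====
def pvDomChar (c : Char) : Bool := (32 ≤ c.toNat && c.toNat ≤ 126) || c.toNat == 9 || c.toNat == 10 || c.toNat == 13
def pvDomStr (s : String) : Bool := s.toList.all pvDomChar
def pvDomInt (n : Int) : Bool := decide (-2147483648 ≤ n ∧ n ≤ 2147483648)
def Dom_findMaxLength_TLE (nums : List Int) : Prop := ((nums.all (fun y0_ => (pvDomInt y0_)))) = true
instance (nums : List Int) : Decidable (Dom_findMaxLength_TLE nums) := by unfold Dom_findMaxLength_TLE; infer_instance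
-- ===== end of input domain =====

-- B replaces A's O(n^2) all-pairs scan over prefix zero counts by a single pass with a
-- first-occurrence map of the running balance.

-- ===== PORT A =====
def findMaxLength_TLE (nums : List Int) : Int :=
  let F : List Int := nums.foldl (fun F e =>
    if e == 0 then F ++ [PySem.List.pyGetD F (-1) 0 + 1]
    else F ++ [PySem.List.pyGetD F (-1) 0]) [0]
  let n : Int := (nums.length : Int)
  (PySem.List.pyRange 0 n 1).foldl (fun ret i =>
    (PySem.List.pyRange (i + 1) (n + 1) 1).foldl (fun ret j =>
      if (PySem.List.pyGetD F j 0 - PySem.List.pyGetD F i 0) * 2 == j - i then max ret (j - i)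
      else ret) ret) 0

-- ===== PORT B =====
def findMaxLength_TLE_alt (nums : List Int) : Int :=
  let s := nums.foldl (fun (s : PySem.Dict Int Int × Int × Int × Int) e =>
    let first := s.1
    let bal := s.2.1 + (if e == 0 then 1 else -1)
    let best := s.2.2.1
    let k := s.2.2.2 + 1
    if first.contains bal then (first, bal, max best (k - first.getD bal 0), k)
    else (first.insert bal k, bal, best, k))
    (PySem.Dict.ofList [((0 : Int), (0 : Int))], 0, 0, 0)
  s.2.2.1

-- ===== PRECONDITION & SPEC =====
def Spec_findMaxLength_TLE (nums : List Int) (out : Int) : Prop := out = findMaxLength_TLE_alt nums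
instance (nums : List Int) (out : Int) : Decidable (Spec_findMaxLength_TLE nums out) := by unfold Spec_findMaxLength_TLE; infer_instance

-- ===== CLAIM (what is proved, stated in full; the proofs are below) =====
def Claim_equal_findMaxLength_TLE : Prop := ∀ (nums : List Int), Dom_findMaxLength_TLE nums → Spec_findMaxLength_TLE nums (findMaxLength_TLE nums)

-- ===== LEMMAS AND PROOFS =====

-- weight of an element: +1 for a zero, -1 for anything else
def pvW (e : Int) : Int := if e = 0 then 1 else -1
-- balance of the length-k prefix (#zeros - #nonzeros)
def pvBal (L : List Int) (k : Nat) : Int := ((L.take k).map pvW).sum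
-- zero count of the length-k prefix
def pvZ (L : List Int) (k : Nat) : Int := ((L.take k).countP (· == 0) : Int)
-- the contribution of the pair (i, j): j - i when the balances agree, else 0
def pvVal (L : List Int) (i j : Nat) : Int := if pvBal L i = pvBal L j then (j : Int) - (i : Int) else 0
-- all pairs i < j ≤ n, grouped by j
def pvPairsB (n : Nat) : List (Nat × Nat) :=
  (List.range (n + 1)).flatMap (fun j => (List.range j).map (fun i => (i, j)))
-- all pairs i < j ≤ n, grouped by i (A's iteration order)
def pvPairsA (n : Nat) : List (Nat × Nat) :=
  (List.range n).flatMap (fun i => (List.range (n - i)).map (fun k => (i, i + 1 + k)))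
-- the common specification: max over all pairs of pvVal
def pvBest (L : List Int) (k : Nat) : Int :=
  ((pvPairsB k).map (fun p => pvVal L p.1 p.2)).foldl max 0
-- first index i ≤ k whose prefix balance is v
def pvFidx (L : List Int) (k : Nat) (v : Int) : Option Nat :=
  if h : ∃ i, i < k + 1 ∧ pvBal L i = v then some (Nat.find h) else none

-- ---- generic max-fold lemmas ----
theorem pvFoldlMaxSelf {l : List Int} {b : Int} (h : ∀ y ∈ l, y ≤ b) : l.foldl max b = b := by
  induction l with
  | nil => rfl
  | cons a t ih =>
      have ha : a ≤ b := h a (by simp)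
      simp only [List.foldl_cons, max_eq_left ha]
      exact ih fun y hy => h y (by simp [hy])

theorem pvFoldlMaxEq {x : Int} : ∀ (l : List Int) (b : Int), x ∈ l → (∀ y ∈ l, y ≤ x) → l.foldl max b = max b x := by
  intro l
  induction l with
  | nil => intro b hx _; simp at hx
  | cons a t ih =>
      intro b hx hub
      simp only [List.foldl_cons]
      rcases List.mem_cons.mp hx with rfl | hxt
      · exact pvFoldlMaxSelf fun y hy => le_trans (hub y (by simp [hy])) (le_max_right b x)
      · rw [ih (max b a) hxt (fun y hy => hub y (by simp [hy])), max_assoc,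
          max_eq_right (hub a (by simp))]

theorem pvFoldlIfMax {ι : Type} (l : List ι) (p : ι → Bool) (g : ι → Int) :
    ∀ r : Int, 0 ≤ r →
      l.foldl (fun r x => if p x then max r (g x) else r) r =
      l.foldl (fun r x => max r (if p x then g x else 0)) r := by
  induction l with
  | nil => intro r _; rfl
  | cons a t ih =>
      intro r hr
      by_cases hp : p a
      · simp only [List.foldl_cons, hp, if_true]
        exact ih _ (le_trans hr (le_max_left _ _))
      · simp only [List.foldl_cons, hp, if_false, Bool.false_eq_true, max_eq_left hr]
        exact ih _ hr

-- ---- pairs lemmas ----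
theorem pvMemPairsA {n : Nat} {p : Nat × Nat} : p ∈ pvPairsA n ↔ p.1 < p.2 ∧ p.2 ≤ n := by
  obtain ⟨i, j⟩ := p
  simp only [pvPairsA, List.mem_flatMap, List.mem_map, List.mem_range]
  constructor
  · rintro ⟨a, ha, k, hk, h⟩
    obtain ⟨rfl, rfl⟩ := Prod.mk.injEq .. ▸ h
    omega
  · rintro ⟨h1, h2⟩
    exact ⟨i, by omega, j - i - 1, by omega, by simp; omega⟩

theorem pvMemPairsB {n : Nat} {p : Nat × Nat} : p ∈ pvPairsB n ↔ p.1 < p.2 ∧ p.2 ≤ n := by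
  obtain ⟨i, j⟩ := p
  simp only [pvPairsB, List.mem_flatMap, List.mem_map, List.mem_range]
  constructor
  · rintro ⟨a, ha, k, hk, h⟩
    obtain ⟨rfl, rfl⟩ := Prod.mk.injEq .. ▸ h
    omega
  · rintro ⟨h1, h2⟩
    exact ⟨j, by omega, i, by omega, rfl⟩

theorem pvPairs_perm (n : Nat) : (pvPairsA n).Perm (pvPairsB n) := by
  have hA : (pvPairsA n).Nodup := by
    rw [pvPairsA, List.nodup_flatMap]
    constructor
    · intro x _
      exact (List.nodup_range).map fun a b h => by
        have := (Prod.mk.injEq .. ▸ h); omega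
    · exact List.pairwise_lt_range.imp fun {a b} hab => by
        intro x hx hy
        simp only [List.mem_map, List.mem_range] at hx hy
        obtain ⟨k1, _, rfl⟩ := hx
        obtain ⟨k2, _, h⟩ := hy
        have := (Prod.mk.injEq .. ▸ h); omega
  have hB : (pvPairsB n).Nodup := by
    rw [pvPairsB, List.nodup_flatMap]
    constructor
    · intro x _
      exact (List.nodup_range).map fun a b h => by
        have := (Prod.mk.injEq .. ▸ h); omega
    · exact List.pairwise_lt_range.imp fun {a b} hab => by
        intro x hx hy
        simp only [List.mem_map, List.mem_range] at hx hy
        obtain ⟨k1, _, rfl⟩ := hx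
        obtain ⟨k2, _, h⟩ := hy
        have := (Prod.mk.injEq .. ▸ h); omega
  exact (List.perm_ext_iff_of_nodup hA hB).mpr fun a => by rw [pvMemPairsA, pvMemPairsB]

-- ---- balance arithmetic ----
theorem pvSumW : ∀ M : List Int, (M.map pvW).sum = 2 * (M.countP (· == 0) : Int) - M.length := by
  intro M
  induction M with
  | nil => simp
  | cons a t ih =>
      by_cases h : a = 0 <;> simp [pvW, h, ih] <;> ring

theorem pvBal_eq_z (L : List Int) (k : Nat) (h : k ≤ L.length) :
    pvBal L k = 2 * pvZ L k - k := by
  have hl : (L.take k).length = k := by simp [List.length_take]; omega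
  rw [pvBal, pvZ, pvSumW, hl]

theorem pvBal_succ (L : List Int) (k : Nat) (e : Int) (he : L[k]? = some e) :
    pvBal L (k + 1) = pvBal L k + pvW e := by
  simp [pvBal, List.take_add_one, he]

theorem pvZ_succ (L : List Int) (k : Nat) (e : Int) (he : L[k]? = some e) :
    pvZ L (k + 1) = pvZ L k + (if e = 0 then 1 else 0) := by
  by_cases h : e = 0 <;> simp [pvZ, List.take_add_one, he, List.countP_append, h]

-- ---- pvFidx characterisation ----
theorem pvFidx_some_iff {L : List Int} {k : Nat} {v : Int} {i : Nat} :
    pvFidx L k v = some i ↔ i ≤ k ∧ pvBal L i = v ∧ ∀ i' < i, pvBal L i' ≠ v := by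
  rw [pvFidx]
  split
  · rename_i h
    simp only [Option.some.injEq]
    constructor
    · rintro rfl
      obtain ⟨h1, h2⟩ := Nat.find_spec h
      refine ⟨by omega, h2, fun i' hi' hbi' => Nat.find_min h hi' ⟨by omega, hbi'⟩⟩
    · rintro ⟨h1, h2, h3⟩
      refine le_antisymm (Nat.find_min' h ⟨by omega, h2⟩) ?_
      by_contra hlt
      exact h3 (Nat.find h) (by omega) (Nat.find_spec h).2
  · rename_i h
    simp only [reduceCtorEq, false_iff, not_and]
    intro h1 h2
    exact absurd ⟨i, by omega, h2⟩ h


theorem pvFidx_none_iff {L : List Int} {k : Nat} {v : Int} :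
    pvFidx L k v = none ↔ ∀ i ≤ k, pvBal L i ≠ v := by
  rw [pvFidx]
  split
  · rename_i h
    simp only [reduceCtorEq, false_iff, not_forall]
    obtain ⟨i, h1, h2⟩ := h
    exact ⟨i, by omega, by simp [h2]⟩
  · rename_i h
    simp only [true_iff]
    intro i hi hbi
    exact h ⟨i, by omega, hbi⟩

theorem pvFidx_succ (L : List Int) (k : Nat) (v : Int) :
    pvFidx L (k + 1) v =
      (match pvFidx L k v with
       | some i => some i
       | none => if pvBal L (k + 1) = v then some (k + 1) else none) := by
  rcases hf : pvFidx L k v with _ | i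
  · have hall := pvFidx_none_iff.mp hf
    by_cases hb : pvBal L (k + 1) = v
    · simp only [hb, if_true]
      exact pvFidx_some_iff.mpr ⟨le_refl _, hb, fun i' hi' => hall i' (by omega)⟩
    · simp only [hb, if_false]
      exact pvFidx_none_iff.mpr fun i hi => by
        rcases Nat.lt_succ_iff_lt_or_eq.mp (Nat.lt_succ_of_le hi) with h | rfl
        · exact hall i (by omega)
        · exact hb
  · obtain ⟨h1, h2, h3⟩ := pvFidx_some_iff.mp hf
    exact pvFidx_some_iff.mpr ⟨by omega, h2, h3⟩

-- ---- pvBest recursion ----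
theorem pvBest_zero (L : List Int) : pvBest L 0 = 0 := by
  simp [pvBest, pvPairsB]

theorem pvBest_nonneg (L : List Int) (k : Nat) : 0 ≤ pvBest L k := by
  exact (PySem.List.le_foldl_max _ 0).1

theorem pvBest_succ (L : List Int) (k : Nat) :
    pvBest L (k + 1) =
      ((List.range (k + 1)).map (fun i => pvVal L i (k + 1))).foldl max (pvBest L k) := by
  have hsplit : pvPairsB (k + 1) = pvPairsB k ++ (List.range (k + 1)).map (fun i => (i, k + 1)) := by
    unfold pvPairsB
    rw [List.range_succ, List.flatMap_append]
    simp
  rw [pvBest, hsplit, List.map_append, List.foldl_append, List.map_map]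
  rfl

-- ---- A's result ----
-- A's prefix-table-building loop body, named so the fold can be reasoned about
def pvStepF (F : List Int) (e : Int) : List Int :=
  if e == 0 then F ++ [PySem.List.pyGetD F (-1) 0 + 1] else F ++ [PySem.List.pyGetD F (-1) 0]

theorem pvF_inv (M : List Int) : ∀ (L : List Int) (m : Nat), m + L.length = M.length → M.drop m = L →
    L.foldl pvStepF ((List.range (m + 1)).map (pvZ M)) = (List.range (M.length + 1)).map (pvZ M) := by
  intro L
  induction L with
  | nil =>
      intro m h1 h2
      have : m = M.length := by simpa using h1
      subst this
      rfl
  | cons e t ih =>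
      intro m h1 h2
      have he : M[m]? = some e := by
        have : (M.drop m)[0]? = some e := by rw [h2]; rfl
        rwa [List.getElem?_drop] at this
      have hstep : pvStepF ((List.range (m + 1)).map (pvZ M)) e = (List.range (m + 2)).map (pvZ M) := by
        have hacc : (List.range (m + 1)).map (pvZ M) = (List.range m).map (pvZ M) ++ [pvZ M m] := by
          rw [List.range_succ, List.map_append]; rfl
        have hlast : PySem.List.pyGetD ((List.range (m + 1)).map (pvZ M)) (-1) 0 = pvZ M m := by
          rw [hacc, PySem.List.pyGetD_neg_one_append_singleton]
        have hz := pvZ_succ M m e he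
        rw [pvStepF]
        by_cases h : e = 0
        · rw [if_pos (by simpa using h), hlast]
          rw [show (List.range (m + 2)) = List.range (m + 1) ++ [m + 1] from List.range_succ,
            List.map_append]
          simp [hz, h]
        · rw [if_neg (by simpa using h), hlast]
          rw [show (List.range (m + 2)) = List.range (m + 1) ++ [m + 1] from List.range_succ,
            List.map_append]
          simp [hz, h]
      rw [List.foldl_cons, hstep]
      refine ih (m + 1) (by simp at h1; omega) ?_
      have : M.drop (m + 1) = (M.drop m).drop 1 := by rw [List.drop_drop]
      rw [this, h2]
      rfl

theorem pvF_eq (nums : List Int) :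
    nums.foldl pvStepF [0] = (List.range (nums.length + 1)).map (pvZ nums) := by
  have h0 : [(0 : Int)] = (List.range (0 + 1)).map (pvZ nums) := by simp [pvZ]
  rw [h0]
  exact pvF_inv nums nums 0 (by omega) rfl

-- the nested loops as a single fold over the pair list
theorem pvFoldlNestedPair {α β γ : Type} (l : List α) (g : α → List β) (emb : α → β → γ)
    (f : Int → γ → Int) (init : Int) :
    l.foldl (fun r x => (g x).foldl (fun r' y => f r' (emb x y)) r) init
      = (l.flatMap (fun x => (g x).map (emb x))).foldl f init := by
  induction l generalizing init with
  | nil => rfl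
  | cons a t ih => simp [List.foldl_append, List.foldl_map, ih]

theorem findMaxLength_TLE_A_eq (nums : List Int) :
    findMaxLength_TLE nums = ((pvPairsA nums.length).map (fun p => pvVal nums p.1 p.2)).foldl max 0 := by
  simp only [findMaxLength_TLE]
  rw [show (fun (F : List Int) (e : Int) =>
      if e == 0 then F ++ [PySem.List.pyGetD F (-1) 0 + 1]
      else F ++ [PySem.List.pyGetD F (-1) 0]) = pvStepF from rfl, pvF_eq]
  set n := nums.length with hn
  set F := (List.range (n + 1)).map (pvZ nums) with hF
  -- the Bool branch condition, as a function of the (Nat) pair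
  set cond : Nat × Nat → Bool :=
    fun p => (pvZ nums p.2 - pvZ nums p.1) * 2 == (p.2 : Int) - (p.1 : Int) with hcond
  have hstep1 :
      (PySem.List.pyRange 0 (n : Int) 1).foldl (fun ret i =>
        (PySem.List.pyRange (i + 1) ((n : Int) + 1) 1).foldl (fun ret j =>
          if (PySem.List.pyGetD F j 0 - PySem.List.pyGetD F i 0) * 2 == j - i then max ret (j - i)
          else ret) ret) 0
      = (pvPairsA n).foldl (fun r p => if cond p then max r ((p.2 : Int) - (p.1 : Int)) else r) 0 := by
    rw [show pvPairsA n = (List.range n).flatMap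
        (fun x => (List.range (n - x)).map ((fun (x : Nat) (y : Nat) => (x, x + 1 + y)) x)) from rfl,
      ← pvFoldlNestedPair (List.range n) (fun x => List.range (n - x))
        (fun (x : Nat) (y : Nat) => (x, x + 1 + y))
        (fun r p => if cond p then max r ((p.2 : Int) - (p.1 : Int)) else r) 0]
    rw [PySem.List.pyRange_zero_natCast, List.foldl_map]
    refine PySem.List.foldl_congr_mem _ _ _ 0 ?_
    intro acc ii hii
    rw [List.mem_range] at hii
    dsimp only
    have hr : PySem.List.pyRange ((ii : Int) + 1) ((n : Int) + 1) 1
        = (List.range (n - ii)).map (fun (k : Nat) => ((ii : Int) + 1 + (k : Int))) := by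
      rw [PySem.List.pyRange_one,
        show (((n : Int) + 1) - ((ii : Int) + 1)).toNat = n - ii from by omega]
    rw [hr, List.foldl_map]
    refine PySem.List.foldl_congr_mem _ _ _ acc ?_
    intro r kk hkk
    rw [List.mem_range] at hkk
    dsimp only
    have hcasti : ((ii : Int) + 1 + (kk : Int)) = ((ii + 1 + kk : Nat) : Int) := by push_cast; ring
    have hgj : PySem.List.pyGetD F ((ii : Int) + 1 + (kk : Int)) 0 = pvZ nums (ii + 1 + kk) := by
      rw [hcasti, PySem.List.pyGetD_natCast, hF, PySem.List.getD_map_range _ _ _ _ (by omega)]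
    have hgi : PySem.List.pyGetD F (ii : Int) 0 = pvZ nums ii := by
      rw [PySem.List.pyGetD_natCast, hF, PySem.List.getD_map_range _ _ _ _ (by omega)]
    rw [hgj, hgi, hcond]
    rw [hcasti]
  rw [hstep1]
  -- now replace the Bool test by the pvVal formulation and fold max
  have hstep2 :
      (pvPairsA n).foldl (fun r p => if cond p then max r ((p.2 : Int) - (p.1 : Int)) else r) 0
      = (pvPairsA n).foldl (fun r p => max r (pvVal nums p.1 p.2)) 0 := by
    rw [pvFoldlIfMax (pvPairsA n) cond (fun p => (p.2 : Int) - (p.1 : Int)) 0 (le_refl 0)]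
    refine PySem.List.foldl_congr_mem _ _ _ 0 ?_
    intro r p hp
    obtain ⟨h1, h2⟩ := pvMemPairsA.mp hp
    congr 1
    rw [hcond, pvVal]
    have hbz : pvBal nums p.1 = pvBal nums p.2 ↔
        (pvZ nums p.2 - pvZ nums p.1) * 2 = (p.2 : Int) - (p.1 : Int) := by
      rw [pvBal_eq_z nums p.1 (by omega), pvBal_eq_z nums p.2 (by omega)]
      constructor <;> intro h <;> omega
    by_cases hb : pvBal nums p.1 = pvBal nums p.2
    · rw [if_pos hb, if_pos (by exact decide_eq_true (by exact_mod_cast hbz.mp hb))]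
    · rw [if_neg hb]
      rw [if_neg ?_]
      intro hc
      exact hb (hbz.mpr (by exact_mod_cast of_decide_eq_true hc))
  rw [hstep2, ← List.foldl_map]

-- ---- B's result ----
-- B's loop body, named so the fold can be reasoned about
def pvStepB (s : PySem.Dict Int Int × Int × Int × Int) (e : Int) :
    PySem.Dict Int Int × Int × Int × Int :=
  let first := s.1
  let bal := s.2.1 + (if e == 0 then 1 else -1)
  let best := s.2.2.1
  let k := s.2.2.2 + 1
  if first.contains bal then (first, bal, max best (k - first.getD bal 0), k)
  else (first.insert bal k, bal, best, k)

def pvInit : PySem.Dict Int Int × Int × Int × Int := (PySem.Dict.ofList [((0 : Int), (0 : Int))], 0, 0, 0)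

theorem pvBinv (L : List Int) (k : Nat) (hk : k ≤ L.length) :
    ((L.take k).foldl pvStepB pvInit).2.2.2 = (k : Int) ∧
    ((L.take k).foldl pvStepB pvInit).2.1 = pvBal L k ∧
    ((L.take k).foldl pvStepB pvInit).2.2.1 = pvBest L k ∧
    ∀ v, ((L.take k).foldl pvStepB pvInit).1.get? v = (pvFidx L k v).map Int.ofNat := by
  induction k with
  | zero =>
      refine ⟨rfl, rfl, (pvBest_zero L).symm, fun v => ?_⟩
      by_cases hv : v = 0
      · subst hv
        rw [pvFidx_some_iff.mpr ⟨le_refl 0, by simp [pvBal], fun i' h => absurd h (Nat.not_lt_zero _)⟩]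
        rfl
      · rw [pvFidx_none_iff.mpr fun i hi => by
          interval_cases i
          simpa [pvBal] using fun h => hv h.symm]
        show (PySem.Dict.mk [((0 : Int), (0 : Int))]).get? v = none
        rw [PySem.Dict.get?_mk_cons]
        simp only [show ((0 : Int) == v) = false by simpa using Ne.symm hv,
          Bool.false_eq_true, if_false]
        rfl
  | succ k ih =>
      obtain ⟨ih1, ih2, ih3, ih4⟩ := ih (by omega)
      have he : L[k]? = some L[k] := List.getElem?_eq_getElem (by omega)
      have htake : L.take (k + 1) = L.take k ++ [L[k]] := by
        rw [List.take_add_one, he]; rfl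
      rw [htake, List.foldl_append, List.foldl_cons, List.foldl_nil]
      set s := (L.take k).foldl pvStepB pvInit with hs
      have hbal' : s.2.1 + (if L[k] == 0 then 1 else -1) = pvBal L (k + 1) := by
        rw [ih2, pvBal_succ L k L[k] he, pvW]
        by_cases h : L[k] = 0 <;> simp [h]
      rw [pvStepB]
      simp only [hbal', ih1]
      rw [PySem.Dict.contains_eq_isSome_get?, ih4 (pvBal L (k + 1))]
      rcases hf : pvFidx L k (pvBal L (k + 1)) with _ | i0
      · -- balance not seen before: best unchanged, dict gains the new balance
        have hall := pvFidx_none_iff.mp hf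
        rw [if_neg (by simp : ¬((Option.map Int.ofNat (none : Option Nat)).isSome = true))]
        refine ⟨by show ((k : Int) + 1) = ((k + 1 : Nat) : Int); omega, rfl, ?_, fun v => ?_⟩
        · show s.2.2.1 = pvBest L (k + 1)
          rw [ih3, pvBest_succ]
          symm
          refine pvFoldlMaxSelf fun y hy => ?_
          obtain ⟨i, hi, rfl⟩ := List.mem_map.mp hy
          rw [List.mem_range] at hi
          rw [pvVal, if_neg fun hb => hall i (by omega) hb]
          exact pvBest_nonneg L k
        · show (s.1.insert (pvBal L (k + 1)) ((k : Int) + 1)).get? v = _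
          rw [PySem.Dict.get?_insert, pvFidx_succ]
          by_cases hv : v = pvBal L (k + 1)
          · subst hv
            rw [if_pos rfl, hf]
            show some ((k : Int) + 1) = Option.map Int.ofNat
              (if pvBal L (k + 1) = pvBal L (k + 1) then some (k + 1) else none)
            rw [if_pos rfl]
            simp only [Option.map_some, Option.some.injEq, Int.ofNat_eq_natCast]
            omega
          · rw [if_neg hv, ih4 v]
            rcases hg : pvFidx L k v with _ | i1
            · show Option.map Int.ofNat none = Option.map Int.ofNat
                (if pvBal L (k + 1) = v then some (k + 1) else none)
              rw [if_neg fun h => hv h.symm]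
            · rfl
      · -- balance first seen at i0 ≤ k: best gains (k+1) - i0
        obtain ⟨hi0, hb0, hmin⟩ := pvFidx_some_iff.mp hf
        rw [if_pos (by simp : (Option.map Int.ofNat (some i0)).isSome = true)]
        refine ⟨by show ((k : Int) + 1) = ((k + 1 : Nat) : Int); omega, rfl, ?_, fun v => ?_⟩
        · show max s.2.2.1 ((k : Int) + 1 - s.1.getD (pvBal L (k + 1)) 0) = pvBest L (k + 1)
          have hgd : s.1.getD (pvBal L (k + 1)) 0 = (i0 : Int) := by
            rw [PySem.Dict.getD_eq_get?_getD, ih4, hf]; rfl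
          have hmem : ((k : Int) + 1 - (i0 : Int)) ∈
              (List.range (k + 1)).map (fun i => pvVal L i (k + 1)) :=
            List.mem_map.mpr ⟨i0, List.mem_range.mpr (by omega),
              by rw [pvVal, if_pos hb0]; push_cast; ring⟩
          have hub : ∀ y ∈ (List.range (k + 1)).map (fun i => pvVal L i (k + 1)),
              y ≤ (k : Int) + 1 - (i0 : Int) := by
            intro y hy
            obtain ⟨i, hi, rfl⟩ := List.mem_map.mp hy
            rw [List.mem_range] at hi
            rw [pvVal]
            split
            · rename_i hb
              have : i0 ≤ i := by
                by_contra hlt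
                exact hmin i (by omega) hb
              push_cast; omega
            · omega
          rw [hgd, ih3, pvBest_succ, pvFoldlMaxEq _ (pvBest L k) hmem hub]
        · show s.1.get? v = _
          rw [ih4 v, pvFidx_succ]
          rcases hg : pvFidx L k v with _ | i1
          · have hvne : pvBal L (k + 1) ≠ v := fun h => by
              rw [h] at hf
              rw [hf] at hg
              simp at hg
            show Option.map Int.ofNat none = Option.map Int.ofNat
              (if pvBal L (k + 1) = v then some (k + 1) else none)
            rw [if_neg hvne]
          · rfl

theorem findMaxLength_TLE_B_eq (nums : List Int) :
    findMaxLength_TLE_alt nums = pvBest nums nums.length := by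
  have h := (pvBinv nums nums.length (le_refl _)).2.2.1
  rw [List.take_length] at h
  exact h

-- ===== VERDICT (by name: the statement is the Claim_ definition above) =====
theorem findMaxLength_TLE_spec : Claim_equal_findMaxLength_TLE := by
  intro nums _
  show _ = _
  rw [findMaxLength_TLE_A_eq, findMaxLength_TLE_B_eq]
  unfold pvBest
  exact ((pvPairs_perm nums.length).map _).foldl_eq 0
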